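-- pv_equiv track=rewrite | github.com/ianlw/2024-I | Algoritmos_Avanzados/proyecto01/toom_cook.py | toom_cook_multiply
-- ===== SOURCE A (Python) =====
-- def toom_cook_multiply(a, b):
--     # Convierte los números en listas de dígitos
--     a_digits = [int(d) for d in str(a)]
--     b_digits = [int(d) for d in str(b)]
--
--     # Divide las listas en partes más pequeñas en 3 partes (Toom-3)
--     n = max(len(a_digits), len(b_digits))
--     split_size = n // 3
--
--     a_parts = [a_digits[i:i + split_size] for i in range(0, len(a_digits), split_size)]
--     b_parts = [b_digits[i:i + split_size] for i in range(0, len(b_digits), split_size)]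
--
--     # Realiza la multiplicación de las partes
--     result_parts = []
--     for i in range(len(a_parts)):
--         part_result = 0
--         for j in range(len(b_parts)):
--             part_result += int(''.join(map(str, a_parts[i]))) * int(''.join(map(str, b_parts[j])))
--         result_parts.append(part_result)
--
--     # Combina los resultados de las partes
--     result = 0
--     for i, part in enumerate(result_parts):
--         result += part * 10**(split_size * i)
--
--     return result
-- ===== SOURCE B (Python) =====
-- def toom_cook_multiply(a, b):
--     # Same digit lists and split size as A (the same exceptions fire in the same
--     # order); then instead of A's index-driven part lists, quadratic double loop
--     # and separate combining loop, the result is computed as the product of two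
--     # recursively chunked sums: sum of b's chunk values times the positionally
--     # weighted (Horner in base 10**split_size) sum of a's chunk values.
--     a_digits = [int(d) for d in str(a)]
--     b_digits = [int(d) for d in str(b)]
--     split_size = max(len(a_digits), len(b_digits)) // 3
--
--     def part_value(ds):
--         return int(''.join(map(str, ds)))
--
--     def chunk_sum(ds):
--         if not ds:
--             return 0
--         return part_value(ds[:split_size]) + chunk_sum(ds[split_size:])
--
--     def weighted(ds):
--         if not ds:
--             return 0
--         return part_value(ds[:split_size]) + 10 ** split_size * weighted(ds[split_size:])
--
--     return chunk_sum(b_digits) * weighted(a_digits)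
-- ===== Notes on version B (the rewrite author's own statement) =====
-- stated objective: alternative
-- what changed: A's index-driven part lists, quadratic nested part-multiplication loop and separate enumerate-combining loop are replaced by two recursive chunkings of the digit lists (a plain chunk sum for b, a Horner-style weighted chunk sum for a) whose product equals A's result by factoring.
import Mathlib
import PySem

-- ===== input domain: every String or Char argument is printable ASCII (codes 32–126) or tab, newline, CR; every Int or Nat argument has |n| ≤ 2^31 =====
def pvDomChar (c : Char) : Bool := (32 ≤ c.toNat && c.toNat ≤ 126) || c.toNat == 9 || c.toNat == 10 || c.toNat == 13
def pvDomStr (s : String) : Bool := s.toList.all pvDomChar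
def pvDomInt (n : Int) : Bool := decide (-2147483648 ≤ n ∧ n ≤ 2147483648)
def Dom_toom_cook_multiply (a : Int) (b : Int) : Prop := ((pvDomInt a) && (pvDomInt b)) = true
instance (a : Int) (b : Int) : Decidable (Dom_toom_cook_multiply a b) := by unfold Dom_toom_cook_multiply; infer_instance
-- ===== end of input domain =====

-- B replaces A's index-driven part lists, quadratic nested part loop and separate combining
-- loop by two recursive chunkings of the digit lists (chunk sum for b, Horner-weighted chunk
-- sum for a) multiplied once; same return value on Pre_.

-- int(''.join(map(str, part))); total form: `none` (Python's ValueError) happens only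
-- outside Pre_ (negative inputs), where the real Python raises before reaching this point
def pvPartValue (part : List Int) : Int :=
  (PySem.Int.ofChars? ((part.map PySem.Int.toChars).flatten)).getD 0

-- ===== PORT A =====
def toom_cook_multiply (a : Int) (b : Int) : Int :=
  let a_digits := (PySem.Int.toChars a).map (fun d => (PySem.Int.ofChars? [d]).getD 0)
  let b_digits := (PySem.Int.toChars b).map (fun d => (PySem.Int.ofChars? [d]).getD 0)
  let n := max (PySem.List.len a_digits) (PySem.List.len b_digits)
  let split_size := PySem.Int.floordiv n 3
  let a_parts := (PySem.List.pyRange 0 (PySem.List.len a_digits) split_size).map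
      (fun i => PySem.List.slice a_digits (some i) (some (i + split_size)))
  let b_parts := (PySem.List.pyRange 0 (PySem.List.len b_digits) split_size).map
      (fun i => PySem.List.slice b_digits (some i) (some (i + split_size)))
  let result_parts := (PySem.List.pyRange 0 (PySem.List.len a_parts) 1).foldl
      (fun rp i =>
        rp ++ [(PySem.List.pyRange 0 (PySem.List.len b_parts) 1).foldl
            (fun pr j => pr + pvPartValue (PySem.List.pyGetD a_parts i []) *
                              pvPartValue (PySem.List.pyGetD b_parts j [])) 0]) []
  (PySem.List.enumerate result_parts 0).foldl
      (fun r ip => r + ip.2 * 10 ^ (split_size * ip.1).toNat) 0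

-- ===== PORT B =====
-- chunk_sum(ds): recursive front-chunking of the digit list (`ds[:split_size]`, `ds[split_size:]`);
-- on Pre_ split_size ≥ 1, so `List.drop (s-1) rest` is exactly Python's `ds[split_size:]`
def pvChunkSum (s : Nat) (ds : List Int) : Int :=
  match ds with
  | [] => 0
  | d :: rest => pvPartValue (List.take s (d :: rest)) + pvChunkSum s (List.drop (s - 1) rest)
termination_by ds.length
decreasing_by simp

-- weighted(ds): same recursion, Horner in base 10^split_size
def pvWeighted (s : Nat) (ds : List Int) : Int :=
  match ds with
  | [] => 0
  | d :: rest => pvPartValue (List.take s (d :: rest)) + 10 ^ s * pvWeighted s (List.drop (s - 1) rest)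
termination_by ds.length
decreasing_by simp

def toom_cook_multiply_alt (a : Int) (b : Int) : Int :=
  let a_digits := (PySem.Int.toChars a).map (fun d => (PySem.Int.ofChars? [d]).getD 0)
  let b_digits := (PySem.Int.toChars b).map (fun d => (PySem.Int.ofChars? [d]).getD 0)
  let split_size := PySem.Int.floordiv (max (PySem.List.len a_digits) (PySem.List.len b_digits)) 3
  pvChunkSum split_size.toNat b_digits * pvWeighted split_size.toNat a_digits

-- ===== PRECONDITION & SPEC =====
-- Pre_: exactly the inputs where Python A returns normally — nonnegative (a '-' digit raises
-- ValueError) and at least one operand has ≥ 3 decimal digits (else split_size = 0 and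
-- range(..., 0) raises ValueError).
def Pre_toom_cook_multiply (a : Int) (b : Int) : Prop :=
  0 ≤ a ∧ 0 ≤ b ∧ (100 ≤ a ∨ 100 ≤ b)
instance (a : Int) (b : Int) : Decidable (Pre_toom_cook_multiply a b) := by
  unfold Pre_toom_cook_multiply; infer_instance

def pvWitness_toom_cook_multiply : Int × Int := (123456, 789)

def Spec_toom_cook_multiply (a : Int) (b : Int) (out : Int) : Prop := out = toom_cook_multiply_alt a b
instance (a : Int) (b : Int) (out : Int) : Decidable (Spec_toom_cook_multiply a b out) := by unfold Spec_toom_cook_multiply; infer_instance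

-- ===== CLAIM (what is proved, stated in full; the proofs are below) =====
def Claim_equal_toom_cook_multiply : Prop := ∀ (a : Int) (b : Int), Dom_toom_cook_multiply a b → Pre_toom_cook_multiply a b → Spec_toom_cook_multiply a b (toom_cook_multiply a b)

-- ===== LEMMAS AND PROOFS =====

-- proof-side chunk list: the chunks both programs cut the digit list into
def pvChunkList (s : Nat) (ds : List Int) : List (List Int) :=
  match ds with
  | [] => []
  | d :: rest => List.take s (d :: rest) :: pvChunkList s (List.drop (s - 1) rest)
termination_by ds.length
decreasing_by simp

-- enumerate commutes with map on the elements
theorem pv_enumerate_map {α β : Type} (f : α → β) (xs : List α) (s : Int) :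
    PySem.List.enumerate (xs.map f) s
      = (PySem.List.enumerate xs s).map (fun ip => (ip.1, f ip.2)) := by
  induction xs generalizing s with
  | nil => simp [PySem.List.enumerate_nil]
  | cons x xs ih => simp [PySem.List.enumerate_cons, ih]

-- the algebraic heart: A's double loop over the parts equals the factored product,
-- for ANY part lists and any split size
theorem pv_factored (ap bp : List (List Int)) (k : Int) :
    (PySem.List.enumerate
       ((PySem.List.pyRange 0 (PySem.List.len ap) 1).foldl
          (fun rp i =>
            rp ++ [(PySem.List.pyRange 0 (PySem.List.len bp) 1).foldl
                (fun pr j => pr + pvPartValue (PySem.List.pyGetD ap i []) *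
                                  pvPartValue (PySem.List.pyGetD bp j [])) 0]) []) 0).foldl
        (fun r ip => r + ip.2 * 10 ^ (k * ip.1).toNat) 0
      = (bp.map pvPartValue).sum *
        ((PySem.List.enumerate ap 0).map
          (fun ip => pvPartValue ip.2 * 10 ^ (k * ip.1).toNat)).sum := by
  rw [PySem.List.foldl_append_singleton_eq_map]
  simp only [List.nil_append, PySem.List.foldl_add, zero_add, List.sum_map_mul_left]
  have hcomp : ∀ (g : List Int → Int) (xs : List (List Int)),
      (PySem.List.pyRange 0 (PySem.List.len xs) 1).map
        (fun j => g (PySem.List.pyGetD xs j [])) = xs.map g := by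
    intro g xs
    have h := congrArg (List.map g) (PySem.List.map_pyGetD_pyRange_zero (xs := xs) (d := []))
    simpa [List.map_map, Function.comp] using h
  have h1 : (PySem.List.pyRange 0 (PySem.List.len bp) 1).map
      (fun j => pvPartValue (PySem.List.pyGetD bp j [])) = bp.map pvPartValue := hcomp pvPartValue bp
  simp only [h1]
  have h2 : (PySem.List.pyRange 0 (PySem.List.len ap) 1).map
      (fun i => pvPartValue (PySem.List.pyGetD ap i []) * (bp.map pvPartValue).sum)
      = ap.map (fun p => pvPartValue p * (bp.map pvPartValue).sum) :=
    hcomp (fun p => pvPartValue p * (bp.map pvPartValue).sum) ap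
  rw [h2]
  rw [pv_enumerate_map, List.map_map, ← List.sum_map_mul_left]
  refine congrArg List.sum (List.map_congr_left ?_)
  intro p _
  simp only [Function.comp]
  ring

-- the Nat-level chunking: A's range-of-slices list is the recursive chunk list
theorem pv_range_chunks (sn : Nat) (hs : 1 ≤ sn) (ds : List Int) :
    (List.range ((ds.length + sn - 1) / sn)).map (fun k => (ds.drop (sn * k)).take sn)
      = pvChunkList sn ds := by
  fun_induction pvChunkList sn ds with
  | case1 =>
    have h0 : ((List.nil (α := Int)).length + sn - 1) / sn = 0 := by
      simp only [List.length_nil, Nat.zero_add]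
      exact Nat.div_eq_of_lt (by omega)
    rw [h0]
    simp
  | case2 d rest ih =>
    have hm : ((d :: rest).length + sn - 1) / sn
        = ((rest.drop (sn-1)).length + sn - 1) / sn + 1 := by
      simp only [List.length_cons, List.length_drop]
      rcases Nat.lt_or_ge rest.length (sn-1) with h | h
      · have hR : (rest.length - (sn-1) + sn - 1) / sn = 0 := Nat.div_eq_of_lt (by omega)
        have hL : (rest.length + 1 + sn - 1) / sn = 1 := by
          have h1 : rest.length + 1 + sn - 1 = rest.length + sn := by omega
          rw [h1]
          exact Nat.div_eq_of_lt_le (by omega) (by omega)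
        rw [hR, hL]
      · have h1 : rest.length - (sn-1) + sn - 1 = rest.length := by omega
        rw [h1]
        have h2 : rest.length + 1 + sn - 1 = rest.length + sn := by omega
        rw [h2, Nat.add_div_right _ (by omega)]
    rw [hm, List.range_succ_eq_map]
    simp only [List.map_cons, List.map_map, Nat.mul_zero, List.drop_zero]
    congr 1
    rw [← ih]
    apply List.map_congr_left
    intro k _
    simp only [Function.comp]
    have hdrop : (d :: rest).drop (sn * (k+1)) = (rest.drop (sn-1)).drop (sn * k) := by
      rw [List.drop_drop]
      have h3 : sn * (k + 1) = (sn - 1 + sn * k) + 1 := by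
        cases sn with
        | zero => omega
        | succ t => ring_nf; omega
      rw [h3, List.drop_succ_cons]
    rw [Nat.succ_eq_add_one, hdrop]

-- Int-level bridge to A's pyRange/slice parts
theorem pv_parts_eq (s : Int) (hs : 1 ≤ s) (ds : List Int) :
    (PySem.List.pyRange 0 (PySem.List.len ds) s).map
        (fun i => PySem.List.slice ds (some i) (some (i + s)))
      = pvChunkList s.toNat ds := by
  obtain ⟨sn, rfl⟩ : ∃ sn : Nat, s = (sn : Int) := ⟨s.toNat, (Int.toNat_of_nonneg (by omega)).symm⟩
  have hsn : 1 ≤ sn := by exact_mod_cast hs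
  rw [PySem.List.pyRange_of_pos _ _ (by exact_mod_cast hsn)]
  have hm : (if (0:Int) < PySem.List.len ds then
        ((PySem.List.len ds - 0 + (sn:Int) - 1) / (sn:Int)).toNat else 0)
      = (ds.length + sn - 1) / sn := by
    simp only [PySem.List.len_eq, Int.sub_zero]
    rcases Nat.eq_zero_or_pos ds.length with h0 | hpos
    · rw [h0]
      simp only [Nat.cast_zero]
      rw [if_neg (by omega)]
      exact (Nat.div_eq_of_lt (by omega)).symm
    · rw [if_pos (by exact_mod_cast hpos)]
      have hc : ((ds.length : Int) + (sn:Int) - 1) = ((ds.length + sn - 1 : Nat) : Int) := by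
        omega
      rw [hc, ← Int.natCast_ediv]
      exact Int.toNat_natCast _
  rw [hm, Int.toNat_natCast, List.map_map, ← pv_range_chunks sn hsn ds]
  apply List.map_congr_left
  intro k _
  simp only [Function.comp]
  have h1 : (0 : Int) + (sn:Int) * (k:Int) = ((sn * k : Nat) : Int) := by push_cast; ring
  have h2 : (0 : Int) + (sn:Int) * (k:Int) + (sn:Int) = ((sn * k : Nat) : Int) + ((sn:Nat) : Int) := by
    push_cast; ring
  rw [h2, h1, PySem.List.slice_natCast_add]

theorem pv_chunkSum_eq (sn : Nat) (ds : List Int) :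
    pvChunkSum sn ds = ((pvChunkList sn ds).map pvPartValue).sum := by
  fun_induction pvChunkSum sn ds with
  | case1 => simp [pvChunkList]
  | case2 d rest ih => rw [pvChunkList]; simp [ih]

theorem pv_weighted_eq (sn : Nat) (ds : List Int) : ∀ (t : Int), 0 ≤ t →
    ((PySem.List.enumerate (pvChunkList sn ds) t).map
        (fun ip => pvPartValue ip.2 * 10 ^ ((sn : Int) * ip.1).toNat)).sum
      = 10 ^ ((sn : Int) * t).toNat * pvWeighted sn ds := by
  fun_induction pvChunkList sn ds with
  | case1 => intro t ht; simp [PySem.List.enumerate_nil, pvWeighted]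
  | case2 d rest ih =>
    intro t ht
    rw [PySem.List.enumerate_cons, List.map_cons, List.sum_cons, ih (t+1) (by omega)]
    have hp : ((sn : Int) * (t+1)).toNat = ((sn : Int) * t).toNat + sn := by
      have h1 : (sn : Int) * (t+1) = (sn : Int) * t + (sn : Int) := by ring
      rw [h1, Int.toNat_add (by positivity) (by positivity)]
      simp
    rw [hp, pow_add]
    rw [show pvWeighted sn (d :: rest)
        = pvPartValue (List.take sn (d :: rest)) + 10 ^ sn * pvWeighted sn (List.drop (sn - 1) rest)
      from by rw [pvWeighted]]
    ring

-- lower bound on the decimal length: Nat.toDigitsCore never shrinks its accumulator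
theorem pv_toDigitsCore_acc_le (f : Nat) : ∀ (n : Nat) (l : List Char),
    l.length ≤ (Nat.toDigitsCore 10 f n l).length := by
  induction f with
  | zero => intro n l; simp [Nat.toDigitsCore]
  | succ f ih =>
    intro n l
    rw [Nat.toDigitsCore]
    split
    · simp
    · calc l.length ≤ (Nat.digitChar (n % 10) :: l).length := by simp
        _ ≤ _ := ih _ _

theorem pv_toDigitsCore_lower (k : Nat) : ∀ (f n : Nat) (l : List Char),
    10 ^ k ≤ n → k < f → k + 1 + l.length ≤ (Nat.toDigitsCore 10 f n l).length := by
  induction k with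
  | zero =>
    intro f n l hn hf
    match f with
    | f + 1 =>
      rw [Nat.toDigitsCore]
      split
      · simp; omega
      · calc 0 + 1 + l.length ≤ (Nat.digitChar (n % 10) :: l).length := by simp; omega
          _ ≤ _ := pv_toDigitsCore_acc_le _ _ _
  | succ k ih =>
    intro f n l hn hf
    match f with
    | f + 1 =>
      have hdiv : 10 ^ k ≤ n / 10 := by
        rw [Nat.le_div_iff_mul_le (by omega)]
        calc 10 ^ k * 10 = 10 ^ (k+1) := by ring
          _ ≤ n := hn
      rw [Nat.toDigitsCore]
      rw [if_neg (by have := Nat.one_le_iff_ne_zero.mp (Nat.le_trans (Nat.one_le_pow _ _ (by omega)) hdiv); omega)]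
      have := ih f (n / 10) (Nat.digitChar (n % 10) :: l) hdiv (by omega)
      simpa [Nat.add_comm, Nat.add_assoc, Nat.add_left_comm] using this

theorem pv_len_ge_three (n : Nat) (h : 100 ≤ n) : 3 ≤ (Nat.toDigits 10 n).length := by
  have := pv_toDigitsCore_lower 2 (n + 1) n [] (by omega) (by omega)
  simpa [Nat.toDigits] using this

theorem pv_main_core (ad bd : List Int) (s : Int) (hs : 1 ≤ s) :
    (PySem.List.enumerate
       ((PySem.List.pyRange 0 (PySem.List.len
            ((PySem.List.pyRange 0 (PySem.List.len ad) s).map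
              (fun i => PySem.List.slice ad (some i) (some (i + s))))) 1).foldl
          (fun rp i =>
            rp ++ [(PySem.List.pyRange 0 (PySem.List.len
                ((PySem.List.pyRange 0 (PySem.List.len bd) s).map
                  (fun i => PySem.List.slice bd (some i) (some (i + s))))) 1).foldl
                (fun pr j => pr + pvPartValue (PySem.List.pyGetD
                      ((PySem.List.pyRange 0 (PySem.List.len ad) s).map
                        (fun i => PySem.List.slice ad (some i) (some (i + s)))) i []) *
                    pvPartValue (PySem.List.pyGetD
                      ((PySem.List.pyRange 0 (PySem.List.len bd) s).map
                        (fun i => PySem.List.slice bd (some i) (some (i + s)))) j [])) 0]) []) 0).foldl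
        (fun r ip => r + ip.2 * 10 ^ (s * ip.1).toNat) 0
      = pvChunkSum s.toNat bd * pvWeighted s.toNat ad := by
  have hsn : ((s.toNat : Nat) : Int) = s := Int.toNat_of_nonneg (by omega)
  rw [pv_factored]
  rw [pv_parts_eq s hs ad, pv_parts_eq s hs bd, ← pv_chunkSum_eq]
  rw [← hsn]
  simp only [Int.toNat_natCast]
  rw [pv_weighted_eq s.toNat ad 0 (le_refl 0)]
  simp

-- split_size ≥ 1 on Pre_: a ≥ 100 gives at least 3 decimal digits
theorem pv_split_pos (a b : Int) (ha : 0 ≤ a) (hb : 0 ≤ b) (hor : 100 ≤ a ∨ 100 ≤ b) :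
    1 ≤ PySem.Int.floordiv
        (max (PySem.List.len ((PySem.Int.toChars a).map (fun d => (PySem.Int.ofChars? [d]).getD 0)))
             (PySem.List.len ((PySem.Int.toChars b).map (fun d => (PySem.Int.ofChars? [d]).getD 0)))) 3 := by
  have hlen : ∀ x : Int, 0 ≤ x → 100 ≤ x → 3 ≤ (PySem.Int.toChars x).length := by
    intro x hx h100
    have : PySem.Int.toChars x = Nat.toDigits 10 x.toNat := by
      simp [PySem.Int.toChars, not_lt.mpr hx]
    rw [this]
    exact pv_len_ge_three _ (by omega)
  rw [PySem.Int.le_floordiv_iff_mul_le (by omega)]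
  simp only [PySem.List.len_eq, List.length_map]
  rcases hor with h | h
  · have h3 : (3:Int) ≤ ((PySem.Int.toChars a).length : Int) := by exact_mod_cast hlen a ha h
    calc (1:Int) * 3 = 3 := by ring
      _ ≤ _ := le_trans h3 (le_max_left _ _)
  · have h3 : (3:Int) ≤ ((PySem.Int.toChars b).length : Int) := by exact_mod_cast hlen b hb h
    calc (1:Int) * 3 = 3 := by ring
      _ ≤ _ := le_trans h3 (le_max_right _ _)

-- ===== VERDICT (by name: the statement is the Claim_ definition above) =====
theorem toom_cook_multiply_spec : Claim_equal_toom_cook_multiply := by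
  intro a b _ hpre
  obtain ⟨ha, hb, hor⟩ := hpre
  unfold Spec_toom_cook_multiply
  have hs := pv_split_pos a b ha hb hor
  simp only [toom_cook_multiply, toom_cook_multiply_alt]
  exact pv_main_core _ _ _ hs
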